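-- pv_equiv track=rewrite | github.com/Eylonl/Mgmtchanges | management_changes_extractor.py | generate_fiscal_quarters
-- ===== SOURCE A (Python) =====
-- def generate_fiscal_quarters(fiscal_year_end_month):
--     fiscal_year_start_month = (fiscal_year_end_month % 12) + 1
--     quarters = {}
--     current_month = fiscal_year_start_month
--
--     for q in range(1, 5):
--         start_month = current_month
--         end_month = (start_month + 2) % 12
--         if end_month == 0:
--             end_month = 12
--         quarters[q] = {'start_month': start_month, 'end_month': end_month}
--         current_month = (end_month % 12) + 1
--
--     return quarters
-- ===== SOURCE B (Python) =====
-- def generate_fiscal_quarters(fiscal_year_end_month):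
--     fiscal_start = (fiscal_year_end_month % 12) + 1
--     return {
--         q: {
--             'start_month': ((fiscal_start - 1 + 3 * (q - 1)) % 12) + 1,
--             'end_month': ((fiscal_start - 1 + 3 * (q - 1) + 2) % 12) + 1,
--         }
--         for q in range(1, 5)
--     }
-- ===== Notes on version B (the rewrite author's own statement) =====
-- stated objective: simpler
-- what changed: Replaced the carried current_month accumulator and modulo-result fixup with a stateless dict comprehension computing each quarter's months by a closed-form modular formula.
import Mathlib
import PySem

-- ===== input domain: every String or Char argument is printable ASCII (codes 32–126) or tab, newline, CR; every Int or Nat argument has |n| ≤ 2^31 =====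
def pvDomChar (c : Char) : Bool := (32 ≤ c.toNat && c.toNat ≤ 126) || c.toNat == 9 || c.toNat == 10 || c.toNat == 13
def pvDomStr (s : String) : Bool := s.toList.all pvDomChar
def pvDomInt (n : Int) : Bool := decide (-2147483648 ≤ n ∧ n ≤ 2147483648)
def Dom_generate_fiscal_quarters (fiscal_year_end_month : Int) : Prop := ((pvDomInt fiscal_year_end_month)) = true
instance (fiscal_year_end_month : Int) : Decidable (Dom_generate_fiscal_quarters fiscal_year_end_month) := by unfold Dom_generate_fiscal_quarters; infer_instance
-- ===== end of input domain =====

-- B replaces A's carried current_month accumulator and wraparound fixup with a stateless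
-- comprehension using a closed-form modular formula per quarter (objective: simpler).

-- ===== PORT A =====
def generate_fiscal_quarters (fiscal_year_end_month : Int) : List (Int × List (String × Int)) :=
  let fiscal_year_start_month := PySem.Int.mod fiscal_year_end_month 12 + 1
  let st := (PySem.List.pyRange 1 5 1).foldl
    (fun (st : PySem.Dict Int (List (String × Int)) × Int) q =>
      let start_month := st.2
      let e0 := PySem.Int.mod (start_month + 2) 12
      let end_month := if e0 = 0 then (12 : Int) else e0
      (st.1.insert q [("start_month", start_month), ("end_month", end_month)],
       PySem.Int.mod end_month 12 + 1))
    (PySem.Dict.empty, fiscal_year_start_month)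
  st.1.items

-- ===== PORT B =====
def generate_fiscal_quarters_alt (fiscal_year_end_month : Int) : List (Int × List (String × Int)) :=
  let fiscal_start := PySem.Int.mod fiscal_year_end_month 12 + 1
  ((PySem.List.pyRange 1 5 1).foldl
    (fun (d : PySem.Dict Int (List (String × Int))) q =>
      d.insert q
        [("start_month", PySem.Int.mod (fiscal_start - 1 + 3 * (q - 1)) 12 + 1),
         ("end_month", PySem.Int.mod (fiscal_start - 1 + 3 * (q - 1) + 2) 12 + 1)])
    PySem.Dict.empty).items

-- ===== PRECONDITION & SPEC =====
def Spec_generate_fiscal_quarters (fiscal_year_end_month : Int) (out : List (Int × List (String × Int))) : Prop := out = generate_fiscal_quarters_alt fiscal_year_end_month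
instance (fiscal_year_end_month : Int) (out : List (Int × List (String × Int))) : Decidable (Spec_generate_fiscal_quarters fiscal_year_end_month out) := by unfold Spec_generate_fiscal_quarters; infer_instance

-- ===== CLAIM (what is proved, stated in full; the proofs are below) =====
def Claim_equal_generate_fiscal_quarters : Prop := ∀ (fiscal_year_end_month : Int), Dom_generate_fiscal_quarters fiscal_year_end_month → Spec_generate_fiscal_quarters fiscal_year_end_month (generate_fiscal_quarters fiscal_year_end_month)

-- ===== LEMMAS AND PROOFS =====

-- Both ports depend on the input only through r = fiscal_year_end_month % 12 ∈ [0, 12).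
def gfqA_of (r : Int) : List (Int × List (String × Int)) :=
  let fiscal_year_start_month := r + 1
  let st := (PySem.List.pyRange 1 5 1).foldl
    (fun (st : PySem.Dict Int (List (String × Int)) × Int) q =>
      let start_month := st.2
      let e0 := PySem.Int.mod (start_month + 2) 12
      let end_month := if e0 = 0 then (12 : Int) else e0
      (st.1.insert q [("start_month", start_month), ("end_month", end_month)],
       PySem.Int.mod end_month 12 + 1))
    (PySem.Dict.empty, fiscal_year_start_month)
  st.1.items

def gfqB_of (r : Int) : List (Int × List (String × Int)) :=
  let fiscal_start := r + 1
  ((PySem.List.pyRange 1 5 1).foldl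
    (fun (d : PySem.Dict Int (List (String × Int))) q =>
      d.insert q
        [("start_month", PySem.Int.mod (fiscal_start - 1 + 3 * (q - 1)) 12 + 1),
         ("end_month", PySem.Int.mod (fiscal_start - 1 + 3 * (q - 1) + 2) 12 + 1)])
    PySem.Dict.empty).items

theorem gfqA_eq (m : Int) : generate_fiscal_quarters m = gfqA_of (PySem.Int.mod m 12) := rfl
theorem gfqB_eq (m : Int) : generate_fiscal_quarters_alt m = gfqB_of (PySem.Int.mod m 12) := rfl

theorem gfq_of_eq (r : Int) (h0 : 0 ≤ r) (h1 : r < 12) : gfqA_of r = gfqB_of r := by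
  interval_cases r <;> decide

-- ===== VERDICT (by name: the statement is the Claim_ definition above) =====
theorem generate_fiscal_quarters_spec : Claim_equal_generate_fiscal_quarters := by
  intro m _
  unfold Spec_generate_fiscal_quarters
  rw [gfqA_eq, gfqB_eq, PySem.Int.mod_eq_emod_of_pos (by norm_num : (0:Int) < 12)]
  exact gfq_of_eq _ (Int.emod_nonneg m (by norm_num)) (Int.emod_lt_of_pos m (by norm_num))
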